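-- pv_equiv track=rewrite | github.com/kanykeiqwerty/PY22_parsing | tasks/tasks.py | getway
-- ===== SOURCE A (Python) =====
-- def getway(a, b):
--     d=0
--     s=0
--     for x in b:
--         if x=='u':
--             s+=1
--             if s==0:
--                 d+=1
--         elif x=='d':
--             s-=1
--     return d
-- ===== SOURCE B (Python) =====
-- def getway(a, b):
--     # Divide and conquer: solve(seg) returns (balance of seg, list of running
--     # balances right after each 'u' step, relative to the start of seg).
--     # A 'u' step counted by the task is one whose absolute running balance is 0,
--     # i.e. a 0 entry of the table for the whole string.
--     def solve(seg):
--         if len(seg) <= 1: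
--             if seg == 'u':
--                 return (1, [1])
--             if seg == 'd':
--                 return (-1, [])
--             return (0, [])
--         mid = len(seg) // 2
--         bl, ul = solve(seg[:mid])
--         br, ur = solve(seg[mid:])
--         return (bl + br, ul + [x + bl for x in ur])
--     return solve(b)[1].count(0)
-- ===== Notes on version B (the rewrite author's own statement) =====
-- stated objective: alternative
-- what changed: Replaces A's fused stateful single pass with a divide-and-conquer recursion: each half is solved independently into (balance, table of relative post-'u' balances), halves are combined by an affine shift of the right table, and the answer is the number of zeros in the final table.
import Mathlib
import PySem

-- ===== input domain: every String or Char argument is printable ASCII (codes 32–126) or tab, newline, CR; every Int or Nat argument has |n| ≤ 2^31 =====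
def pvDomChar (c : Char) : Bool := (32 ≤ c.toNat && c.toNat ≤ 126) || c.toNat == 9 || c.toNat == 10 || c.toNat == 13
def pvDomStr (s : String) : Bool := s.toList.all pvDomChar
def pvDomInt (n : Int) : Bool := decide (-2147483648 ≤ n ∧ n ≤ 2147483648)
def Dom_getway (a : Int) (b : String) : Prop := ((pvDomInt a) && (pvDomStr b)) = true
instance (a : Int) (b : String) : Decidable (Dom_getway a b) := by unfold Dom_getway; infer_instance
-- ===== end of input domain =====

-- B replaces A's fused stateful single pass by a divide-and-conquer recursion that builds a table of
-- post-'u' running balances and counts its zeros (alternative decomposition; not claimed faster).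


-- ===== PORT A =====
-- one iteration of A's loop body over the state (d, s)
def pvStepA (st : Int × Int) (x : Char) : Int × Int :=
  if x = 'u' then
    if st.2 + 1 = 0 then (st.1 + 1, st.2 + 1) else (st.1, st.2 + 1)
  else if x = 'd' then (st.1, st.2 - 1)
  else st

-- literal transliteration of A: single fused loop over b with state (d, s) starting at (0, 0)
def getway (a : Int) (b : String) : Int :=
  (b.toList.foldl pvStepA (0, 0)).1

-- ===== PORT B =====
-- python solve(seg): (balance of seg, list of running balances right after each 'u' step, relative
-- to seg's start); seg[:mid] / seg[mid:] with 0 ≤ mid ≤ len(seg) are exactly take/drop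
def pvSolve (l : List Char) : Int × List Int :=
  if h : 2 ≤ l.length then
    let mid := l.length / 2
    let L := pvSolve (l.take mid)
    let R := pvSolve (l.drop mid)
    (L.1 + R.1, L.2 ++ R.2.map (· + L.1))
  else
    if l = ['u'] then (1, [1])
    else if l = ['d'] then (-1, [])
    else (0, [])
termination_by l.length
decreasing_by
  · simp only [List.length_take]; omega
  · simp only [List.length_drop]; omega

-- port of B: solve the whole string, then '.count(0)' on the table
def getway_alt (a : Int) (b : String) : Int :=
  ((pvSolve b.toList).2.count 0 : Int)

-- ===== PRECONDITION & SPEC =====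
def Spec_getway (a : Int) (b : String) (out : Int) : Prop := out = getway_alt a b
instance (a : Int) (b : String) (out : Int) : Decidable (Spec_getway a b out) := by unfold Spec_getway; infer_instance

-- ===== CLAIM (what is proved, stated in full; the proofs are below) =====
def Claim_equal_getway : Prop := ∀ (a : Int) (b : String), Dom_getway a b → Spec_getway a b (getway a b)

-- ===== LEMMAS AND PROOFS =====

-- spec device: the running balances right after each 'u' step, starting from balance s
def pvUb : List Char → Int → List Int
  | [], _ => []
  | c :: t, s =>
    if c = 'u' then (s + 1) :: pvUb t (s + 1)
    else if c = 'd' then pvUb t (s - 1)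
    else pvUb t s

-- spec device: net balance of a list of characters
def pvBal (l : List Char) : Int :=
  (l.map (fun c => if c = 'u' then (1 : Int) else if c = 'd' then -1 else 0)).sum

-- A's loop computes (d + #zeros of the balance table, s + net balance)
theorem getway_loop_eq (l : List Char) (d s : Int) :
    l.foldl pvStepA (d, s) = (d + ((pvUb l s).count 0 : Int), s + pvBal l) := by
  induction l generalizing d s with
  | nil => simp [pvUb, pvBal]
  | cons c t ih =>
    rw [List.foldl_cons]
    by_cases hu : c = 'u'
    · by_cases hz : s + 1 = 0
      · rw [show pvStepA (d, s) c = (d + 1, s + 1) by simp [pvStepA, hu, hz], ih]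
        simp [pvUb, pvBal, hu, hz, Prod.ext_iff]
        constructor
        · ring
        · omega
      · rw [show pvStepA (d, s) c = (d, s + 1) by simp [pvStepA, hu, hz], ih]
        simp [pvUb, pvBal, hu, hz, Prod.ext_iff]
        ring
    · by_cases hd : c = 'd'
      · rw [show pvStepA (d, s) c = (d, s - 1) by simp [pvStepA, hd], ih]
        simp [pvUb, pvBal, hd, Prod.ext_iff]
        ring
      · rw [show pvStepA (d, s) c = (d, s) by simp [pvStepA, hu, hd], ih]
        simp [pvUb, pvBal, hu, hd]

-- the balance table from start s is the table from start 0 shifted by s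
theorem pvUb_shift (l : List Char) (s : Int) :
    pvUb l s = (pvUb l 0).map (· + s) := by
  induction l generalizing s with
  | nil => simp [pvUb]
  | cons c t ih =>
    by_cases hu : c = 'u'
    · simp only [pvUb, if_pos hu]
      rw [ih (s + 1), ih (0 + 1), List.map_cons, List.map_map]
      congr 1
      · ring
      · exact List.map_congr_left (fun a _ => by simp only [Function.comp_apply]; omega)
    · by_cases hd : c = 'd'
      · simp only [pvUb, if_neg hu, if_pos hd]
        rw [ih (s - 1), ih (0 - 1), List.map_map]
        exact List.map_congr_left (fun a _ => by simp only [Function.comp_apply]; omega)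
      · simp only [pvUb, if_neg hu, if_neg hd]
        exact ih s

-- the balance table of a concatenation: left table, then right table entered at the left's balance
theorem pvUb_append (l1 l2 : List Char) (s : Int) :
    pvUb (l1 ++ l2) s = pvUb l1 s ++ pvUb l2 (s + pvBal l1) := by
  induction l1 generalizing s with
  | nil => simp [pvUb, pvBal]
  | cons c t ih =>
    by_cases hu : c = 'u'
    · rw [show s + pvBal (c :: t) = (s + 1) + pvBal t by
        simp only [pvBal, List.map_cons, List.sum_cons, if_pos hu]; ring]
      simp only [List.cons_append, pvUb, if_pos hu, ih (s + 1)]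
    · by_cases hd : c = 'd'
      · rw [show s + pvBal (c :: t) = (s - 1) + pvBal t by
          simp only [pvBal, List.map_cons, List.sum_cons, if_neg hu, if_pos hd]; ring]
        simp only [List.cons_append, pvUb, if_neg hu, if_pos hd, ih (s - 1)]
      · rw [show s + pvBal (c :: t) = s + pvBal t by
          simp only [pvBal, List.map_cons, List.sum_cons, if_neg hu, if_neg hd]; ring]
        simp only [List.cons_append, pvUb, if_neg hu, if_neg hd, ih s]

theorem pvBal_append (l1 l2 : List Char) : pvBal (l1 ++ l2) = pvBal l1 + pvBal l2 := by
  simp [pvBal]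

-- B's divide-and-conquer computes exactly (net balance, balance table from 0)
theorem pvSolve_spec (l : List Char) : pvSolve l = (pvBal l, pvUb l 0) := by
  induction l using pvSolve.induct with
  | case1 l h mid ihL ihR =>
    rw [pvSolve]
    simp only [dif_pos h]
    rw [ihL, ihR]
    have hsplit : l.take (l.length / 2) ++ l.drop (l.length / 2) = l :=
      List.take_append_drop _ l
    refine Prod.ext ?_ ?_
    · show pvBal (l.take (l.length / 2)) + pvBal (l.drop (l.length / 2)) = pvBal l
      rw [← pvBal_append, hsplit]
    · show pvUb (l.take (l.length / 2)) 0 ++ (pvUb (l.drop (l.length / 2)) 0).map (· + pvBal (l.take (l.length / 2))) = pvUb l 0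
      rw [← pvUb_shift, show pvBal (l.take (l.length / 2)) = 0 + pvBal (l.take (l.length / 2)) by ring,
          ← pvUb_append, hsplit]
  | case2 l => rw [pvSolve]; simp [pvUb, pvBal]
  | case3 l => rw [pvSolve]; simp [pvUb, pvBal]
  | case4 l hlen hu hd =>
    rw [pvSolve]
    simp only [dif_neg hlen, if_neg hu, if_neg hd]
    match l, hlen, hu, hd with
    | [], _, _, _ => simp [pvUb, pvBal]
    | [c], _, hu, hd =>
      have hcu : c ≠ 'u' := fun hc => hu (by rw [hc])
      have hcd : c ≠ 'd' := fun hc => hd (by rw [hc])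
      simp [pvUb, pvBal, hcu, hcd]
    | c1 :: c2 :: t, hlen, _, _ => exact absurd (by simp) hlen

-- ===== VERDICT (by name: the statement is the Claim_ definition above) =====
theorem getway_spec : Claim_equal_getway := by
  intro a b _
  unfold Spec_getway getway getway_alt
  rw [getway_loop_eq, pvSolve_spec]
  simp
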